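-- pv_equiv track=rewrite | github.com/ribalda/adventofcode | 2021/12/step2.py | validate_road
-- ===== SOURCE A (Python) =====
-- def validate_road(road, end):
--     if end[0].isupper():
--         return True
--
--     if end == "start":
--         return False
--
--     visited = dict()
--     visited[end] = True
--     n_two = 0
--     for r in road:
--         if r[0].isupper():
--             continue
--         if r not in visited:
--             visited[r] = True
--         else:
--             n_two += 1
--             if n_two == 2:
--                 return False
--     return True
-- ===== SOURCE B (Python) =====
-- def validate_road(road, end):
--     if end[0].isupper():
--         return True
--     if end == "start":
--         return False
--     caves = sorted([end] + [r for r in road if not r[:1].isupper()])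
--     return sum(1 for a, b in zip(caves, caves[1:]) if a == b) < 2
-- ===== Notes on version B (the rewrite author's own statement) =====
-- stated objective: alternative
-- what changed: Replaces A's incremental visited-dict pass with an early-exit repeat counter by a sort-then-scan algorithm: collect the small caves (end seeded in, uppercase-initial skipped via a [:1] slice that never indexes), sort them, and count adjacent equal pairs in the sorted list, returning whether that count is below 2.
-- outside the precondition, e.g. on validate_road(['a', 'a', ''], 'a'): A returns False, B returns False; on validate_road([''], 'a'): A raises IndexError, B returns True
import Mathlib
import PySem

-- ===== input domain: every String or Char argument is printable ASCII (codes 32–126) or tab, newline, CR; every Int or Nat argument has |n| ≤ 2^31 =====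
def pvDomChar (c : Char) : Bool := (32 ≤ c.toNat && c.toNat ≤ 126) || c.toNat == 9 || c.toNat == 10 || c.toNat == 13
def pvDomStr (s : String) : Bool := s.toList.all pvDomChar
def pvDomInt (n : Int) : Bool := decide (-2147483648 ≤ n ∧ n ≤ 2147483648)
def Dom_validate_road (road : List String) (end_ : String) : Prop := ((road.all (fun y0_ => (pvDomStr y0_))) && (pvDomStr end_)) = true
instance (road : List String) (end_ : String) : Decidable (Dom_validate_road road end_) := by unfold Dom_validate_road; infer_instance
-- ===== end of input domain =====

-- B replaces A's incremental visited-dict pass (early exit at the second repeat) by sort-then-scan: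
-- sort the small caves (end seeded in) and count adjacent equal pairs; alternative, same practical cost.


-- ===== PORT A =====
-- s[0].isupper() (first char; Pre_ guarantees the string is nonempty wherever A reaches this)
def pvFirstUpper (s : String) : Bool :=
  match s.toList with
  | [] => false
  | c :: _ => PySem.Chars.isupper c

-- the 'for r in road' loop of A, carried state: visited dict, n_two
def pvLoopA : List String → PySem.Dict String Bool → Int → Bool
  | [], _, _ => true
  | r :: rest, visited, n_two =>
    if pvFirstUpper r then pvLoopA rest visited n_two
    else if visited.contains r = false then pvLoopA rest (visited.insert r true) n_two
    else if n_two + 1 = 2 then false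
    else pvLoopA rest visited (n_two + 1)

def validate_road (road : List String) (end_ : String) : Bool :=
  if pvFirstUpper end_ then true
  else if end_ = "start" then false
  else pvLoopA road ((PySem.Dict.empty : PySem.Dict String Bool).insert end_ true) 0

-- ===== PORT B =====
-- s[:1].isupper(): hand port, exact because the slice has length ≤ 1
-- (''.isupper() is False; a one-char string is isupper iff its char is an uppercase letter)
def pvSliceUpper (s : String) : Bool :=
  match PySem.List.slice s.toList none (some 1) with
  | [] => false
  | c :: _ => PySem.Chars.isupper c

def validate_road_alt (road : List String) (end_ : String) : Bool :=
  if pvSliceUpper end_ then true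
  else if end_ = "start" then false
  else
    let caves :=
      PySem.List.sorted (end_ :: road.filter (fun r => !pvSliceUpper r)) (fun x => x) false
    decide (((caves.zip (PySem.List.slice caves (some 1) none)).countP (fun p => p.1 == p.2) : Int) < 2)

-- ===== PRECONDITION & SPEC =====
-- Pre_ excludes empty strings: an empty end (end[0] raises IndexError at once) and, when the
-- cave loop is actually reached (end lowercase-initial and not "start"), any empty string in
-- road — A's r[0] raises IndexError whenever the loop reaches such an element, and which
-- elements are reached depends on A's early exit, so the whole class is excluded (on the
-- excluded roads where A still returns False before reaching the empty string, B returns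
-- False as well).
def Pre_validate_road (road : List String) (end_ : String) : Prop :=
  end_ ≠ "" ∧ (pvFirstUpper end_ = false → end_ ≠ "start" → ∀ r ∈ road, r ≠ "")
instance (road : List String) (end_ : String) : Decidable (Pre_validate_road road end_) := by unfold Pre_validate_road; infer_instance
def pvWitness_validate_road : List String × String := (["ab", "cd", "ab"], "cd")

def Spec_validate_road (road : List String) (end_ : String) (out : Bool) : Prop := out = validate_road_alt road end_
instance (road : List String) (end_ : String) (out : Bool) : Decidable (Spec_validate_road road end_ out) := by unfold Spec_validate_road; infer_instance

-- ===== CLAIM (what is proved, stated in full; the proofs are below) =====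
def Claim_equal_validate_road : Prop := ∀ (road : List String) (end_ : String), Dom_validate_road road end_ → Pre_validate_road road end_ → Spec_validate_road road end_ (validate_road road end_)

-- ===== LEMMAS AND PROOFS =====

-- the two head-uppercase tests agree (the [:1] slice is the head when nonempty, empty otherwise)
theorem pvSliceUpper_eq (s : String) : pvSliceUpper s = pvFirstUpper s := by
  unfold pvSliceUpper pvFirstUpper
  have h : PySem.List.slice s.toList none (some 1) = s.toList.take 1 := by simp [pysem]
  rw [h]
  cases s.toList <;> rfl

-- yardstick for A's loop: number of "extra" (already-seen) lowercase occurrences, given seen set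
def pvExtra : List String → List String → Int
  | [], _ => 0
  | r :: rest, seen =>
    if pvFirstUpper r then pvExtra rest seen
    else if r ∈ seen then 1 + pvExtra rest seen
    else pvExtra rest (r :: seen)

theorem pvExtra_nonneg (l : List String) (seen : List String) : 0 ≤ pvExtra l seen := by
  induction l generalizing seen with
  | nil => simp [pvExtra]
  | cons r rest ih =>
    simp only [pvExtra]
    split_ifs with h1 h2
    · exact ih seen
    · have := ih seen; omega
    · exact ih (r :: seen)

theorem pvExtra_congr (l : List String) (s s' : List String)
    (h : ∀ x, x ∈ s ↔ x ∈ s') : pvExtra l s = pvExtra l s' := by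
  induction l generalizing s s' with
  | nil => rfl
  | cons r rest ih =>
    simp only [pvExtra]
    by_cases hu : pvFirstUpper r
    · simp [hu, ih s s' h]
    · by_cases hm : r ∈ s
      · simp [hu, hm, (h r).mp hm, ih s s' h]
      · have hm' : r ∉ s' := fun hx => hm ((h r).mpr hx)
        simp only [hu, if_false, hm, hm']
        exact ih (r :: s) (r :: s') (by intro x; simp [h x])

-- A's loop decides 'n + extras < 2' (for n ∈ {0,1}), with visited tracked as its key set
theorem pvLoopA_eq (l : List String) (V : PySem.Dict String Bool) (n : Int)
    (hn : n = 0 ∨ n = 1) :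
    pvLoopA l V n = decide (n + pvExtra l V.keys < 2) := by
  induction l generalizing V n with
  | nil => simp only [pvLoopA, pvExtra]; rcases hn with h | h <;> simp [h]
  | cons r rest ih =>
    simp only [pvLoopA, pvExtra]
    by_cases hu : pvFirstUpper r
    · simp [hu, ih V n hn]
    · simp only [hu, if_false, Bool.false_eq_true]
      by_cases hc : V.contains r = false
      · have hm : r ∉ V.keys := by
          intro hx
          have := (PySem.Dict.contains_iff_mem_keys V r).mpr hx
          simp [hc] at this
        rw [if_pos hc, ih (V.insert r true) n hn, if_neg hm,
            PySem.Dict.keys_insert_of_not_contains _ _ (by simpa using hc)]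
        congr 1
        have := pvExtra_congr rest (V.keys ++ [r]) (r :: V.keys) (by intro x; simp; tauto)
        rw [this]
      · have hc' : V.contains r = true := by simpa using hc
        have hm : r ∈ V.keys := (PySem.Dict.contains_iff_mem_keys V r).mp hc'
        rw [if_neg hc, if_pos hm]
        by_cases h2 : n + 1 = 2
        · have hn1 : n = 1 := by omega
          have := pvExtra_nonneg rest V.keys
          subst hn1
          rw [if_pos h2]
          symm
          rw [decide_eq_false_iff_not]
          omega
        · have hn0 : n = 0 := by rcases hn with h | h <;> omega
          rw [if_neg h2, ih V (n + 1) (by omega), decide_eq_decide]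
          omega

-- B's yardstick: adjacent equal pairs of a list (what the zip/countP computes)
def pvAdj (l : List String) : Nat := (l.zip l.tail).countP (fun p => p.1 == p.2)

-- on a ≤-sorted list, adjacent equal pairs + distinct elements = length
theorem pvAdj_sorted (l : List String) (hp : l.Pairwise (· ≤ ·)) :
    pvAdj l + l.toFinset.card = l.length := by
  induction l with
  | nil => simp [pvAdj]
  | cons a t ih =>
    cases t with
    | nil => simp [pvAdj]
    | cons b t' =>
      have hp' : (b :: t').Pairwise (· ≤ ·) := hp.tail
      have hab : a ≤ b := (List.pairwise_cons.mp hp).1 b List.mem_cons_self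
      have ihv := ih hp'
      by_cases heq : a = b
      · have hcard : (a :: b :: t').toFinset = (b :: t').toFinset := by
          rw [List.toFinset_cons, Finset.insert_eq_self.mpr (by simp [heq])]
        have hadj : pvAdj (a :: b :: t') = 1 + pvAdj (b :: t') := by
          simp [pvAdj, heq, Nat.add_comm]
        rw [hadj, hcard]
        simp only [List.length_cons] at *
        omega
      · have hnm : a ∉ b :: t' := by
          intro hmem
          rcases List.mem_cons.mp hmem with h | h
          · exact heq h
          · have hba : b ≤ a := (List.pairwise_cons.mp hp').1 a h
            exact heq (le_antisymm hab hba)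
        have hcard : (a :: b :: t').toFinset.card = (b :: t').toFinset.card + 1 := by
          rw [List.toFinset_cons, Finset.card_insert_of_notMem (by simpa using hnm)]
        have hadj : pvAdj (a :: b :: t') = pvAdj (b :: t') := by
          simp [pvAdj, heq]
        rw [hadj, hcard]
        simp only [List.length_cons] at *
        omega

-- A's extras count, expressed through distinct-element counting (seen nodup)
theorem pvExtra_card (l : List String) (seen : List String) (hnd : seen.Nodup) :
    pvExtra l seen + (((seen ++ l.filter (fun r => !pvFirstUpper r)).toFinset.card : Int))
      = (l.filter (fun r => !pvFirstUpper r)).length + seen.length := by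
  induction l generalizing seen with
  | nil =>
    simp [pvExtra, List.toFinset_card_of_nodup hnd]
  | cons r rest ih =>
    by_cases hu : pvFirstUpper r
    · have hf : (r :: rest).filter (fun r => !pvFirstUpper r)
          = rest.filter (fun r => !pvFirstUpper r) := by simp [hu]
      have hstep : pvExtra (r :: rest) seen = pvExtra rest seen := by
        simp only [pvExtra]; rw [if_pos hu]
      rw [hstep, hf]
      exact ih seen hnd
    · have hf : (r :: rest).filter (fun r => !pvFirstUpper r)
          = r :: rest.filter (fun r => !pvFirstUpper r) := by
        simp [hu]
      rw [hf]
      by_cases hm : r ∈ seen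
      · have hstep : pvExtra (r :: rest) seen = 1 + pvExtra rest seen := by
          simp only [pvExtra]; rw [if_neg hu, if_pos hm]
        have hset : (seen ++ r :: rest.filter (fun r => !pvFirstUpper r)).toFinset
            = (seen ++ rest.filter (fun r => !pvFirstUpper r)).toFinset := by
          ext x
          simp only [List.mem_toFinset, List.mem_append, List.mem_cons]
          constructor
          · rintro (h | rfl | h)
            exacts [Or.inl h, Or.inl hm, Or.inr h]
          · rintro (h | h)
            exacts [Or.inl h, Or.inr (Or.inr h)]
        have hrec := ih seen hnd
        rw [hstep, hset]
        simp only [List.length_cons]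
        push_cast at hrec ⊢
        omega
      · have hnd' : (r :: seen).Nodup := List.nodup_cons.mpr ⟨hm, hnd⟩
        have hstep : pvExtra (r :: rest) seen = pvExtra rest (r :: seen) := by
          simp only [pvExtra]; rw [if_neg hu, if_neg hm]
        have hset : (seen ++ r :: rest.filter (fun r => !pvFirstUpper r)).toFinset
            = ((r :: seen) ++ rest.filter (fun r => !pvFirstUpper r)).toFinset := by
          ext x
          simp only [List.mem_toFinset, List.mem_append, List.mem_cons]
          tauto
        have hrec := ih (r :: seen) hnd'
        rw [hstep, hset]
        simp only [List.length_cons] at hrec ⊢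
        push_cast at hrec ⊢
        omega

-- ===== VERDICT (by name: the statement is the Claim_ definition above) =====
theorem validate_road_spec : Claim_equal_validate_road := by
  intro road end_ _ _
  unfold Spec_validate_road validate_road validate_road_alt
  rw [pvSliceUpper_eq]
  by_cases hu : pvFirstUpper end_
  · simp [hu]
  · by_cases hs : end_ = "start"
    · simp [hs]
    · simp only [hu, hs, if_false, Bool.false_eq_true]
      have hkeysA : ((PySem.Dict.empty : PySem.Dict String Bool).insert end_ true).keys = [end_] := by
        rw [PySem.Dict.keys_insert_of_not_contains _ _ (by simp)]
        simp
      rw [pvLoopA_eq road _ 0 (Or.inl rfl), hkeysA]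
      -- B's side: rewrite the filter predicate, name the sorted list, use pvAdj
      have hfil : road.filter (fun r => !pvSliceUpper r) = road.filter (fun r => !pvFirstUpper r) := by
        apply List.filter_congr
        intro x _
        rw [pvSliceUpper_eq]
      rw [hfil]
      set caves := end_ :: road.filter (fun r => !pvFirstUpper r) with hcaves
      set s := PySem.List.sorted caves (fun x => x) false with hsdef
      have hperm : s.Perm caves := PySem.List.sorted_perm caves (fun x => x) false
      have hpair : s.Pairwise (· ≤ ·) := by
        simpa using PySem.List.sorted_pairwise caves (fun x => x)
      rw [PySem.List.slice_from_one s]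
      have hAdjDef : (s.zip s.tail).countP (fun p => p.1 == p.2) = pvAdj s := rfl
      rw [hAdjDef, decide_eq_decide]
      have hAdjZ : (pvAdj s : Int) + (s.toFinset.card : Int) = (s.length : Int) := by
        exact_mod_cast pvAdj_sorted s hpair
      have hfs : s.toFinset = caves.toFinset := List.toFinset_eq_of_perm _ _ hperm
      have hE := pvExtra_card road [end_] (by simp)
      have hlen : (s.length : Int)
          = ((road.filter (fun r => !pvFirstUpper r)).length : Int) + 1 := by
        rw [hperm.length_eq, hcaves]
        simp
      have hcfin : caves.toFinset = ([end_] ++ road.filter (fun r => !pvFirstUpper r)).toFinset := by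
        simp [hcaves]
      rw [← hcfin, ← hfs] at hE
      simp only [List.length_cons, List.length_nil] at hE
      push_cast at hE
      omega
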